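-- pv_equiv track=rewrite | github.com/Grau720/vuln5g | services/ingest/protocols/detect_protocols.py | inferir_protocolo_principal
-- ===== SOURCE A (Python) =====
-- def inferir_protocolo_principal(protocolos: list[str]) -> str | None:
--     if not protocolos:
--         return None
--     preferencia = ["PFCP", "NGAP", "GTP-U", "GTP-C", "DIAMETER", "HTTP/2", "SCTP"]
--     for p in preferencia:
--         if p in protocolos:
--             return p
--     return protocolos[0]
-- ===== SOURCE B (Python) =====
-- def inferir_protocolo_principal(protocolos: list[str]) -> str | None:
--     if not protocolos:
--         return None
--     preferencia = ["PFCP", "NGAP", "GTP-U", "GTP-C", "DIAMETER", "HTTP/2", "SCTP"]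
--     rank = {p: i for i, p in enumerate(preferencia)}
--     best = len(preferencia)
--     for p in protocolos:
--         r = rank.get(p, len(preferencia))
--         if r < best:
--             best = r
--     return preferencia[best] if best < len(preferencia) else protocolos[0]
-- ===== Notes on version B (the rewrite author's own statement) =====
-- stated objective: alternative
-- what changed: Instead of scanning the fixed preference list and testing membership in the input for each (A), B builds a rank dictionary once and makes a single pass over the input tracking the minimum rank, indexing the preference list at the end.
import Mathlib
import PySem

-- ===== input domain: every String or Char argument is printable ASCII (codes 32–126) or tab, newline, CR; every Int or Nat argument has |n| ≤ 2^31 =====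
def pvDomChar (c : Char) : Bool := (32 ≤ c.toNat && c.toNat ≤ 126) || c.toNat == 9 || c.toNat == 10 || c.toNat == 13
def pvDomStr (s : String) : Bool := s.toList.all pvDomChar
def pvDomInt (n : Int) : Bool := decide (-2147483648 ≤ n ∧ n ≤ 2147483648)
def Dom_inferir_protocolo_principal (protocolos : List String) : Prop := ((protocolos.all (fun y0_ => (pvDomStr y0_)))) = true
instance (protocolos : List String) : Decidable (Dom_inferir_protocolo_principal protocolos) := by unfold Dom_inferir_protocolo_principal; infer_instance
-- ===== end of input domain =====

-- B replaces A's scan of the fixed preference list (membership test per preference) by a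
-- single pass over the input tracking the minimum rank from a rank dictionary (objective: alternative).

-- ===== PORT A =====
def pvPreferencia : List String := ["PFCP", "NGAP", "GTP-U", "GTP-C", "DIAMETER", "HTTP/2", "SCTP"]

-- the 'for p in preferencia: if p in protocolos: return p' loop, then 'return protocolos[0]'
def pvLoopA (protocolos : List String) : List String → Option String
  | [] => PySem.List.pyGet? protocolos 0
  | p :: ps => if protocolos.contains p then some p else pvLoopA protocolos ps

def inferir_protocolo_principal (protocolos : List String) : Option String :=
  if protocolos = [] then none
  else pvLoopA protocolos pvPreferencia

-- ===== PORT B =====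
-- rank = {p: i for i, p in enumerate(preferencia)}
def pvRankDict : PySem.Dict String Int :=
  (PySem.List.enumerate pvPreferencia).foldl (fun d ip => d.insert ip.2 ip.1) PySem.Dict.empty

-- r = rank.get(p, 7)
def pvRk (p : String) : Int := pvRankDict.getD p 7

-- the loop body: if r < best: best = r
def pvStep (best : Int) (p : String) : Int :=
  let r := pvRk p
  if r < best then r else best

def inferir_protocolo_principal_alt (protocolos : List String) : Option String :=
  if protocolos = [] then none
  else
    let best := protocolos.foldl pvStep 7
    if best < 7 then PySem.List.pyGet? pvPreferencia best
    else PySem.List.pyGet? protocolos 0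

-- ===== PRECONDITION & SPEC =====
def Spec_inferir_protocolo_principal (protocolos : List String) (out : Option String) : Prop := out = inferir_protocolo_principal_alt protocolos
instance (protocolos : List String) (out : Option String) : Decidable (Spec_inferir_protocolo_principal protocolos out) := by unfold Spec_inferir_protocolo_principal; infer_instance

-- ===== CLAIM (what is proved, stated in full; the proofs are below) =====
def Claim_equal_inferir_protocolo_principal : Prop := ∀ (protocolos : List String), Dom_inferir_protocolo_principal protocolos → Spec_inferir_protocolo_principal protocolos (inferir_protocolo_principal protocolos)

-- ===== LEMMAS AND PROOFS =====

theorem pvG0 : PySem.List.pyGet? pvPreferencia 0 = some "PFCP" := by decide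
theorem pvG1 : PySem.List.pyGet? pvPreferencia 1 = some "NGAP" := by decide
theorem pvG2 : PySem.List.pyGet? pvPreferencia 2 = some "GTP-U" := by decide
theorem pvG3 : PySem.List.pyGet? pvPreferencia 3 = some "GTP-C" := by decide
theorem pvG4 : PySem.List.pyGet? pvPreferencia 4 = some "DIAMETER" := by decide
theorem pvG5 : PySem.List.pyGet? pvPreferencia 5 = some "HTTP/2" := by decide
theorem pvG6 : PySem.List.pyGet? pvPreferencia 6 = some "SCTP" := by decide

theorem pvRk_vals (p : String) :
    pvRk p = if "PFCP" = p then 0 else if "NGAP" = p then 1 else if "GTP-U" = p then 2 else if "GTP-C" = p then 3 else if "DIAMETER" = p then 4 else if "HTTP/2" = p then 5 else if "SCTP" = p then 6 else 7 := by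
  have hd : pvRankDict = PySem.Dict.mk
      [("PFCP", 0), ("NGAP", 1), ("GTP-U", 2), ("GTP-C", 3), ("DIAMETER", 4),
       ("HTTP/2", 5), ("SCTP", 6)] := by decide
  rw [pvRk, hd]
  simp only [PySem.Dict.getD, PySem.Dict.get?_mk_cons, beq_iff_eq]
  split_ifs <;> simp [PySem.Dict.get?]

theorem pvRk_bounds (p : String) : 0 ≤ pvRk p ∧ pvRk p ≤ 7 := by
  have h := pvRk_vals p
  split_ifs at h <;> omega

theorem pvFold_le_init (xs : List String) (b : Int) : xs.foldl pvStep b ≤ b := by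
  induction xs generalizing b with
  | nil => simp
  | cons x xs ih =>
    simp only [List.foldl_cons]
    refine le_trans (ih _) ?_
    simp only [pvStep]
    split_ifs with h <;> omega

theorem pvFold_le_mem (xs : List String) (b : Int) (p : String) (hp : p ∈ xs) :
    xs.foldl pvStep b ≤ pvRk p := by
  induction xs generalizing b with
  | nil => cases hp
  | cons x xs ih =>
    simp only [List.foldl_cons]
    rcases List.mem_cons.mp hp with h | h
    · subst h
      refine le_trans (pvFold_le_init xs _) ?_
      simp only [pvStep]
      split_ifs with h <;> omega
    · exact ih _ h

theorem pvFold_mem (xs : List String) (b : Int) :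
    xs.foldl pvStep b = b ∨ ∃ p ∈ xs, xs.foldl pvStep b = pvRk p := by
  induction xs generalizing b with
  | nil => left; rfl
  | cons x xs ih =>
    simp only [List.foldl_cons]
    rcases ih (pvStep b x) with h | ⟨p, hp, h⟩
    · rw [h]
      simp only [pvStep]
      split_ifs with hlt
      · right; exact ⟨x, List.mem_cons_self, rfl⟩
      · left; rfl
    · right; exact ⟨p, List.mem_cons_of_mem _ hp, h⟩

theorem pvRk_eq_pref (p : String) (j : Int) (h0 : 0 ≤ j) (h7 : j < 7) (h : pvRk p = j) :
    PySem.List.pyGet? pvPreferencia j = some p := by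
  have hv := pvRk_vals p
  rw [h] at hv
  split_ifs at hv <;> subst_vars <;> first | decide | omega

theorem pvPref_rk (i : Int) (q : String) (h0 : 0 ≤ i) (h7 : i < 7)
    (hq : PySem.List.pyGet? pvPreferencia i = some q) : pvRk q = i := by
  interval_cases i <;> simp only [pvG0, pvG1, pvG2, pvG3, pvG4, pvG5, pvG6, Option.some_inj] at hq <;> subst hq <;> decide

-- best = i when pvPreferencia[i] ∈ xs and no earlier preference is
theorem pvBest_eq (xs : List String) (i : Int) (h0 : 0 ≤ i) (h7 : i < 7) (q : String)
    (hq : PySem.List.pyGet? pvPreferencia i = some q) (hmem : q ∈ xs)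
    (hnot : ∀ (j : Int) (r : String), 0 ≤ j → j < i →
        PySem.List.pyGet? pvPreferencia j = some r → r ∉ xs) :
    xs.foldl pvStep 7 = i := by
  have hrk : pvRk q = i := pvPref_rk i q h0 h7 hq
  have hle : xs.foldl pvStep 7 ≤ i := hrk ▸ pvFold_le_mem xs 7 q hmem
  rcases pvFold_mem xs 7 with h | ⟨p, hp, h⟩
  · omega
  · have hb := pvRk_bounds p
    by_contra hne
    have hlt : pvRk p < i := by omega
    have hr := pvRk_eq_pref p (pvRk p) hb.1 (by omega) rfl
    exact hnot (pvRk p) p hb.1 hlt hr hp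

-- ===== VERDICT (by name: the statement is the Claim_ definition above) =====
theorem inferir_protocolo_principal_spec : Claim_equal_inferir_protocolo_principal := by
  intro xs _
  unfold Spec_inferir_protocolo_principal
  unfold inferir_protocolo_principal inferir_protocolo_principal_alt
  by_cases hnil : xs = []
  · simp [hnil]
  · simp only [hnil, if_false]
    by_cases h0 : "PFCP" ∈ xs
    · have hb : xs.foldl pvStep 7 = 0 :=
        pvBest_eq xs 0 (by omega) (by omega) "PFCP" pvG0 h0
          (by intro j r hj0 hji hr; omega)
      simp [pvLoopA, pvPreferencia, h0, hb]
    ·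
      by_cases h1 : "NGAP" ∈ xs
      · have hb : xs.foldl pvStep 7 = 1 :=
          pvBest_eq xs 1 (by omega) (by omega) "NGAP" pvG1 h1
            (by intro j r hj0 hji hr; interval_cases j; simp only [pvG0, Option.some_inj] at hr; subst hr; assumption)
        simp [pvLoopA, pvPreferencia, h0, h1, hb]
      ·
        by_cases h2 : "GTP-U" ∈ xs
        · have hb : xs.foldl pvStep 7 = 2 :=
            pvBest_eq xs 2 (by omega) (by omega) "GTP-U" pvG2 h2
              (by intro j r hj0 hji hr; interval_cases j <;> simp only [pvG0, pvG1, Option.some_inj] at hr <;> subst hr <;> assumption)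
          simp [pvLoopA, pvPreferencia, h0, h1, h2, hb]
        ·
          by_cases h3 : "GTP-C" ∈ xs
          · have hb : xs.foldl pvStep 7 = 3 :=
              pvBest_eq xs 3 (by omega) (by omega) "GTP-C" pvG3 h3
                (by intro j r hj0 hji hr; interval_cases j <;> simp only [pvG0, pvG1, pvG2, Option.some_inj] at hr <;> subst hr <;> assumption)
            simp [pvLoopA, pvPreferencia, h0, h1, h2, h3, hb]
          ·
            by_cases h4 : "DIAMETER" ∈ xs
            · have hb : xs.foldl pvStep 7 = 4 :=
                pvBest_eq xs 4 (by omega) (by omega) "DIAMETER" pvG4 h4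
                  (by intro j r hj0 hji hr; interval_cases j <;> simp only [pvG0, pvG1, pvG2, pvG3, Option.some_inj] at hr <;> subst hr <;> assumption)
              simp [pvLoopA, pvPreferencia, h0, h1, h2, h3, h4, hb]
            ·
              by_cases h5 : "HTTP/2" ∈ xs
              · have hb : xs.foldl pvStep 7 = 5 :=
                  pvBest_eq xs 5 (by omega) (by omega) "HTTP/2" pvG5 h5
                    (by intro j r hj0 hji hr; interval_cases j <;> simp only [pvG0, pvG1, pvG2, pvG3, pvG4, Option.some_inj] at hr <;> subst hr <;> assumption)
                simp [pvLoopA, pvPreferencia, h0, h1, h2, h3, h4, h5, hb]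
              ·
                by_cases h6 : "SCTP" ∈ xs
                · have hb : xs.foldl pvStep 7 = 6 :=
                    pvBest_eq xs 6 (by omega) (by omega) "SCTP" pvG6 h6
                      (by intro j r hj0 hji hr; interval_cases j <;> simp only [pvG0, pvG1, pvG2, pvG3, pvG4, pvG5, Option.some_inj] at hr <;> subst hr <;> assumption)
                  simp [pvLoopA, pvPreferencia, h0, h1, h2, h3, h4, h5, h6, hb]
                ·
                  have hb : xs.foldl pvStep 7 = 7 := by
                    rcases pvFold_mem xs 7 with h | ⟨p, hp, h⟩
                    · exact h
                    · have hv := pvRk_vals p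
                      split_ifs at hv <;> subst_vars <;> first | omega | exact absurd hp (by assumption)
                  simp [pvLoopA, pvPreferencia, h0, h1, h2, h3, h4, h5, h6, hb]
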